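-- pv_equiv track=rewrite | github.com/DoanTrungHuy/practice-interview-code | 2568-minimum-impossible-or/2568-minimum-impossible-or.py | minImpossibleOR
-- ===== SOURCE A (Python) =====
-- from typing import List
--
-- def minImpossibleOR(nums: List[int]) -> int:
--     nums.sort()
--     i = 1
--
--     while True:
--         if nums.count(i) == 0:
--             return i
--         i *= 2
--
--     return -1
-- ===== SOURCE B (Python) =====
-- def minImpossibleOR(nums):
--     nums.sort()
--     pow = 1
--     for x in nums:
--         if x == pow:
--             pow *= 2
--         elif x > pow:
--             return pow
--         # x < pow: skip duplicates / smaller values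
--     return pow
-- ===== Notes on version B (the rewrite author's own statement) =====
-- stated objective: alternative
-- what changed: Replace the repeated nums.count(i) full scan per power of two with a single merge-style pass over the sorted list that advances a target power pointer; the dominant sort cost is unchanged, so measured runtime is the same.
import Mathlib
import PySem

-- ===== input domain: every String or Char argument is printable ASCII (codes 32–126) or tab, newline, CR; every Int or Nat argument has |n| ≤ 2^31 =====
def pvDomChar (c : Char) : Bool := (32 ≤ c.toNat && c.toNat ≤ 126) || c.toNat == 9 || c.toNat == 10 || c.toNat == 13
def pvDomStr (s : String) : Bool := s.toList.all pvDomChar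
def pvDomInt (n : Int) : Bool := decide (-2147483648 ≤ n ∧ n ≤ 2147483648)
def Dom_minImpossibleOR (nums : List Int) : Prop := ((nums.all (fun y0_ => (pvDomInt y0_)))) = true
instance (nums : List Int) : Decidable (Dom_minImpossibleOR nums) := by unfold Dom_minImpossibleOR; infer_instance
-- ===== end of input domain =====

-- B replaces A's per-power full-list count(i) scan by one merge-style pass over the
-- sorted list with an advancing target power (objective: alternative algorithm; the sort
-- dominates, so no speed is claimed). Both sort the argument in place in Python; the
-- equivalence proved here is about the return value (the mutation is identical).

-- ===== PORT A =====
-- helper lemmas cited by loopA's termination proof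
theorem pv_foldl_max_le_self (l : List Int) (a : Int) : a ≤ l.foldl max a := by
  induction l generalizing a with
  | nil => simp
  | cons y ys ih => exact le_trans (le_max_left a y) (ih (max a y))

theorem pv_le_foldl_max (l : List Int) : ∀ (a x : Int), x ∈ l → x ≤ l.foldl max a := by
  induction l with
  | nil => intro a x hx; cases hx
  | cons y ys ih =>
    intro a x hx
    rcases List.mem_cons.mp hx with rfl | h
    · exact le_trans (le_max_right a x) (pv_foldl_max_le_self ys (max a x))
    · exact ih (max a y) x h

-- the 'while True' loop of A: check count, double i; terminates because once i exceeds
-- every element the count is 0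
def loopA (l : List Int) (i : Int) (hi : 1 ≤ i) : Int :=
  if h : PySem.List.count l i = 0 then i
  else loopA l (i * 2) (by omega)
termination_by (l.foldl max 0 + 1 - i).toNat
decreasing_by
  have hmem : i ∈ l := by
    rw [PySem.List.count_eq] at h
    exact List.count_pos_iff.mp (Nat.pos_of_ne_zero h)
  have := pv_le_foldl_max l 0 i hmem
  omega

def minImpossibleOR (nums : List Int) : Int :=
  loopA (PySem.List.sorted nums (fun x => x) false) 1 (by norm_num)

-- ===== PORT B =====
-- the for-loop of B: advance the target power on a match, skip smaller elements,
-- return the power at the first larger element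
def loopB : List Int → Int → Int
  | [], p => p
  | x :: xs, p =>
    if x = p then loopB xs (p * 2)
    else if x < p then loopB xs p
    else p

def minImpossibleOR_alt (nums : List Int) : Int :=
  loopB (PySem.List.sorted nums (fun x => x) false) 1

-- ===== PRECONDITION & SPEC =====
def Spec_minImpossibleOR (nums : List Int) (out : Int) : Prop := out = minImpossibleOR_alt nums
instance (nums : List Int) (out : Int) : Decidable (Spec_minImpossibleOR nums out) := by unfold Spec_minImpossibleOR; infer_instance

-- ===== CLAIM (what is proved, stated in full; the proofs are below) =====
def Claim_equal_minImpossibleOR : Prop := ∀ (nums : List Int), Dom_minImpossibleOR nums → Spec_minImpossibleOR nums (minImpossibleOR nums)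

-- ===== LEMMAS AND PROOFS =====

-- if p does not occur, B's scan returns p (smaller elements are skipped, a larger one stops)
theorem loopB_not_mem (l : List Int) (p : Int) (hp : p ∉ l) : loopB l p = p := by
  induction l with
  | nil => rfl
  | cons x xs ih =>
    have hxp : x ≠ p := fun h => hp (h ▸ List.mem_cons_self)
    simp only [loopB, if_neg hxp]
    split
    · exact ih (fun h => hp (List.mem_cons_of_mem _ h))
    · rfl

-- on a sorted list containing p (with 1 ≤ p), B's scan from target p equals the scan from 2p
theorem loopB_mem (l : List Int) (p : Int) (hp : 1 ≤ p)
    (hs : l.Pairwise (· ≤ ·)) (hm : p ∈ l) : loopB l p = loopB l (p * 2) := by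
  induction l with
  | nil => cases hm
  | cons x xs ih =>
    have hs' : xs.Pairwise (· ≤ ·) := (List.pairwise_cons.mp hs).2
    have hub : ∀ y ∈ xs, x ≤ y := (List.pairwise_cons.mp hs).1
    by_cases hxp : x = p
    · subst hxp
      have h1 : ¬ (x = x * 2) := by omega
      have h2 : x < x * 2 := by omega
      simp [loopB, h1, h2]
    · rcases List.mem_cons.mp hm with h | h
      · exact absurd h.symm hxp
      · have hxle : x ≤ p := hub p h
        have hxlt : x < p := lt_of_le_of_ne hxle hxp
        have h1 : ¬ (x = p * 2) := by omega
        have h2 : x < p * 2 := by omega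
        simp only [loopB, if_neg hxp, if_pos hxlt, if_neg h1, if_pos h2]
        exact ih hs' h

-- the main invariant: on a sorted list, A's count-and-double loop equals B's single scan
theorem loopA_eq_loopB (l : List Int) (i : Int) (hi : 1 ≤ i)
    (hs : l.Pairwise (· ≤ ·)) : loopA l i hi = loopB l i := by
  fun_induction loopA l i hi with
  | case1 i hi h =>
    have hnm : i ∉ l := by
      rw [PySem.List.count_eq] at h
      exact List.count_eq_zero.mp h
    exact (loopB_not_mem l i hnm).symm
  | case2 i hi h ih =>
    have hmem : i ∈ l := by
      rw [PySem.List.count_eq] at h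
      exact List.count_pos_iff.mp (Nat.pos_of_ne_zero h)
    rw [ih, loopB_mem l i hi hs hmem]

-- ===== VERDICT (by name: the statement is the Claim_ definition above) =====
theorem minImpossibleOR_spec : Claim_equal_minImpossibleOR := by
  intro nums _
  unfold Spec_minImpossibleOR minImpossibleOR minImpossibleOR_alt
  exact loopA_eq_loopB _ 1 (by norm_num) (PySem.List.sorted_pairwise nums (fun x => x))
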